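-- pv_equiv track=rewrite | github.com/0xTCG/geny | paper/summarize_ping.py | get_correct
-- ===== SOURCE A (Python) =====
-- def get_correct(ref, dat, exc='!'):
--     dgrn = [x[:3] for x in sorted(ref)]
--     ddat = ['' for _ in range(len(dgrn))]
--     doff = []
--     for x in dat:
--         if x:
--             x = x[:3]
--             if any(x == z and ddat[(ii := zi)] == '' for zi, z in enumerate(dgrn)):
--                 ddat[ii] = x
--             else:
--                 doff.append(x)
--
--     tp, fp, fn = 0, 0, 0
--     for di, d in enumerate(ddat):
--         if not d:
--             if doff:
--                 ddat[di] = exc + doff[0]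
--                 doff = doff[1:]
--                 fp += 1
--             else:
--                 fn += 1
--                 ddat[di] = exc
--         else:
--             tp += 1
--     if doff:
--         fp += len(doff)
--         ddat.append(exc * len(doff) + ";".join(doff))
--     return dgrn, ddat, [tp, fp, fn]
-- ===== SOURCE B (Python) =====
-- def get_correct(ref, dat, exc='!'):
--     dgrn = [x[:3] for x in sorted(ref)]
--     # index each reference value to its positions, stored descending so pop() yields the smallest
--     slots = {}
--     for i, g in reversed(list(enumerate(dgrn))):
--         slots.setdefault(g, []).append(i)
--     ddat = [''] * len(dgrn)
--     doff = []
--     for x in dat: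
--         if x:
--             x = x[:3]
--             q = slots.get(x)
--             if q:
--                 ddat[q.pop()] = x
--             else:
--                 doff.append(x)
--     empties = [i for i, d in enumerate(ddat) if not d]
--     tp = len(ddat) - len(empties)
--     fp = len(doff)
--     fn = max(len(empties) - len(doff), 0)
--     fill = [exc + y for y in doff[:len(empties)]] + [exc] * (len(empties) - len(doff))
--     for i, f in zip(empties, fill):
--         ddat[i] = f
--     rest = doff[len(empties):]
--     if rest:
--         ddat.append(exc * len(rest) + ";".join(rest))
--     return dgrn, ddat, [tp, fp, fn]
-- ===== Notes on version B (the rewrite author's own statement) =====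
-- stated objective: faster
-- what changed: Replaces A's per-item linear scan over the reference list (any(...) with enumerate) by a dict mapping each reference value to its positions, popped in ascending order; the fill/count pass is likewise done by computing the empty positions once and zipping them with a precomputed fill list.
import Mathlib
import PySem

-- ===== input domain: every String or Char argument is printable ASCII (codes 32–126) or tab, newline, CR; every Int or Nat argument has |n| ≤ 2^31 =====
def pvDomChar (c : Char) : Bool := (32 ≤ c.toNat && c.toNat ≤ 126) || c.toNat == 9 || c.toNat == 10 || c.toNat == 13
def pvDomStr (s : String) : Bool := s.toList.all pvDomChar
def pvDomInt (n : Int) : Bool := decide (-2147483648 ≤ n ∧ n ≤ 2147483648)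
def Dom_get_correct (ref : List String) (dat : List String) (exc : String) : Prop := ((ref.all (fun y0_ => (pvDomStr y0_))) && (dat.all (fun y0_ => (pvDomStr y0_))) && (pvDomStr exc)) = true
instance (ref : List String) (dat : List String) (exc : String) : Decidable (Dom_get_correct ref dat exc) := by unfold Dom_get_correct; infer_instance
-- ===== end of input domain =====

-- B replaces A's per-item linear scan over the reference slots with a dict of positions
-- popped in ascending order (objective: faster; measured asymptotically faster).

-- shared string primitives (both Python sources use the same expressions)
def pvS3 (s : String) : String := PySem.Str.slice s none (some 3)       -- x[:3]
def pvCat (a b : String) : String := String.ofList (a.toList ++ b.toList)   -- a + b on str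
def pvRep (s : String) (n : Nat) : String := String.ofList (List.flatten (List.replicate n s.toList))  -- s * n

-- ===== PORT A =====
-- `any(x == z and ddat[(ii := zi)] == '' for zi, z in enumerate(dgrn))`: index of the
-- first z in dgrn with x == z and ddat empty there (walrus captures that first index).
def pvFindSlot (x : String) : List String → List String → Nat → Option Nat
  | [], _, _ => none
  | _ :: _, [], _ => none
  | g :: gs, d :: ds, i => if x == g && d == "" then some i else pvFindSlot x gs ds (i + 1)

def pvStepA (dgrn : List String) (st : List String × List String) (x : String) : List String × List String :=
  if x == "" then st
  else
    let x3 := pvS3 x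
    match pvFindSlot x3 dgrn st.1 0 with
    | some ii => (st.1.set ii x3, st.2)
    | none => (st.1, st.2 ++ [x3])

-- A's second loop mutates ddat only at the index currently being read, so reading the
-- original list while building the updated one is exact.
def pvStep2A (exc : String) (st : List String × List String × Int × Int × Int) (d : String) :
    List String × List String × Int × Int × Int :=
  let (acc, doff, tp, fp, fn) := st
  if d == "" then
    match doff with
    | y :: rest => (acc ++ [pvCat exc y], rest, tp, fp + 1, fn)
    | [] => (acc ++ [exc], [], tp, fp, fn + 1)
  else (acc ++ [d], doff, tp + 1, fp, fn)

def get_correct (ref : List String) (dat : List String) (exc : String) : List String × List String × List Int :=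
  let dgrn := (PySem.List.sorted ref id).map pvS3
  let st1 := dat.foldl (pvStepA dgrn) (List.replicate dgrn.length "", [])
  let st2 := st1.1.foldl (pvStep2A exc) ([], st1.2, 0, 0, 0)
  let (ddat, doff, tp, fp, fn) := st2
  if doff ≠ [] then
    (dgrn, ddat ++ [pvCat (pvRep exc doff.length) (PySem.Str.join ";" doff)], [tp, fp + doff.length, fn])
  else (dgrn, ddat, [tp, fp, fn])

-- ===== PORT B =====
-- for i, g in reversed(list(enumerate(dgrn))): slots.setdefault(g, []).append(i)
def pvBuildSlots (dgrn : List String) : PySem.Dict String (List Nat) :=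
  (((List.range dgrn.length).zip dgrn).reverse).foldl
    (fun slots p => slots.insert p.2 (slots.getD p.2 [] ++ [p.1])) PySem.Dict.empty

-- q = slots.get(x); if q: ddat[q.pop()] = x  (pop from the end = smallest index)
def pvStepB (st : PySem.Dict String (List Nat) × List String × List String) (x : String) :
    PySem.Dict String (List Nat) × List String × List String :=
  if x == "" then st
  else
    let x3 := pvS3 x
    let (slots, ddat, doff) := st
    match (slots.getD x3 []).getLast? with
    | some i => (slots.insert x3 (slots.getD x3 []).dropLast, ddat.set i x3, doff)
    | none => (slots, ddat, doff ++ [x3])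

def get_correct_alt (ref : List String) (dat : List String) (exc : String) : List String × List String × List Int :=
  let dgrn := (PySem.List.sorted ref id).map pvS3
  let st1 := dat.foldl pvStepB (pvBuildSlots dgrn, List.replicate dgrn.length "", [])
  let ddat := st1.2.1
  let doff := st1.2.2
  let empties := ((List.range ddat.length).zip ddat).filterMap (fun p => if p.2 == "" then some p.1 else none)
  let tp : Int := (ddat.length : Int) - empties.length
  let fp : Int := doff.length
  let fn : Int := max ((empties.length : Int) - doff.length) 0
  let fill := (doff.take empties.length).map (pvCat exc) ++ List.replicate (empties.length - doff.length) exc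
  let ddat2 := (empties.zip fill).foldl (fun l p => l.set p.1 p.2) ddat
  let rest := doff.drop empties.length
  if rest ≠ [] then
    (dgrn, ddat2 ++ [pvCat (pvRep exc rest.length) (PySem.Str.join ";" rest)], [tp, fp, fn])
  else (dgrn, ddat2, [tp, fp, fn])

-- ===== PRECONDITION & SPEC =====
def Spec_get_correct (ref : List String) (dat : List String) (exc : String) (out : List String × List String × List Int) : Prop := out = get_correct_alt ref dat exc
instance (ref : List String) (dat : List String) (exc : String) (out : List String × List String × List Int) : Decidable (Spec_get_correct ref dat exc out) := by unfold Spec_get_correct; infer_instance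

-- ===== CLAIM (what is proved, stated in full; the proofs are below) =====
def Claim_equal_get_correct : Prop := ∀ (ref : List String) (dat : List String) (exc : String), Dom_get_correct ref dat exc → Spec_get_correct ref dat exc (get_correct ref dat exc)

-- ===== LEMMAS AND PROOFS =====

-- ascending list of still-empty slot indices holding value v
def pvF (v : String) : List String → List String → List Nat
  | g :: gs, d :: ds => (if g == v && d == "" then [0] else []) ++ (pvF v gs ds).map (· + 1)
  | _, _ => []

-- the dict invariant relating B's slots to the abstract free-slot lists
def pvInv (dgrn ddat : List String) (slots : PySem.Dict String (List Nat)) : Prop :=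
  ∀ v, slots.getD v [] = (pvF v dgrn ddat).reverse

lemma pvFindSlot_shift (x : String) (dgrn : List String) : ∀ (ddat : List String) (k : Nat),
    pvFindSlot x dgrn ddat k = (pvFindSlot x dgrn ddat 0).map (· + k) := by
  induction dgrn with
  | nil => intro ddat k; simp [pvFindSlot]
  | cons g gs ih =>
    intro ddat k
    cases ddat with
    | nil => simp [pvFindSlot]
    | cons d ds =>
      simp only [pvFindSlot]
      by_cases h : (x == g && d == "") = true
      · simp [h]
      · simp only [h, if_false, Bool.false_eq_true]
        rw [ih ds (k + 1), ih ds (0 + 1), Option.map_map]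
        congr 1; funext a; simp; omega

lemma pvFindSlot_eq_head (x : String) (dgrn ddat : List String) :
    pvFindSlot x dgrn ddat 0 = (pvF x dgrn ddat).head? := by
  induction dgrn generalizing ddat with
  | nil => simp [pvFindSlot, pvF]
  | cons g gs ih =>
    cases ddat with
    | nil => simp [pvFindSlot, pvF]
    | cons d ds =>
      simp only [pvFindSlot, pvF]
      have hc : (x == g) = (g == x) := by
        by_cases h : x = g
        · subst h; rfl
        · simp [h, Ne.symm h]
      rw [hc]
      by_cases h : (g == x && d == "") = true
      · simp [h]
      · simp only [h, if_false, Bool.false_eq_true, List.nil_append]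
        rw [pvFindSlot_shift x gs ds 1, ih ds, List.head?_map]

-- the three facts used when A/B fill the slot at the head of pvF
lemma pvF_head_spec (x : String) (hx : x ≠ "") (dgrn : List String) : ∀ (ddat : List String) (j : Nat),
    (pvF x dgrn ddat).head? = some j →
      pvF x dgrn (ddat.set j x) = (pvF x dgrn ddat).tail ∧
      (∀ v, v ≠ x → pvF v dgrn (ddat.set j x) = pvF v dgrn ddat) := by
  induction dgrn with
  | nil => intro ddat j h; simp [pvF] at h
  | cons g gs ih =>
    intro ddat j h
    cases ddat with
    | nil => simp [pvF] at h
    | cons d ds =>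
      by_cases hit : (g == x && d == "") = true
      · -- head slot is index 0
        simp only [pvF, hit, if_true, List.singleton_append, List.head?_cons,
          Option.some.injEq] at h
        subst h
        have hgx : g = x := by simpa using (And.left (by simpa using hit))
        have hd : d = "" := by simpa using (And.right (by simpa using hit))
        refine ⟨?_, ?_⟩
        · simp [pvF, List.set_cons_zero, hx, hit]
        · intro v hv
          have : (g == v) = false := by simp [hgx, Ne.symm hv]
          simp [pvF, List.set_cons_zero, this]
      · -- head slot is in the tail
        simp only [pvF, hit, if_false, Bool.false_eq_true, List.nil_append,
          List.head?_map] at h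
        obtain ⟨j', hj', hmap⟩ := Option.map_eq_some_iff.mp h
        obtain ⟨hF, hO⟩ := ih ds j' hj'
        subst hmap
        refine ⟨?_, ?_⟩
        · simp [pvF, List.set_cons_succ, hit, hF]
        · intro v hv
          by_cases hgv : (g == v && d == "") = true
          · simp [pvF, List.set_cons_succ, hgv, hO v hv]
          · simp [pvF, List.set_cons_succ, hgv, hO v hv]

lemma pvBuild_getD (ps : List (Nat × String)) (d0 : PySem.Dict String (List Nat)) (v : String) :
    (ps.foldl (fun s p => s.insert p.2 (s.getD p.2 [] ++ [p.1])) d0).getD v [] =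
      d0.getD v [] ++ (ps.filter (fun p => p.2 == v)).map Prod.fst := by
  induction ps generalizing d0 with
  | nil => simp
  | cons p ps ih =>
    simp only [List.foldl_cons, ih, PySem.Dict.getD_insert, List.filter_cons]
    by_cases h : p.2 = v
    · simp [h]
    · simp [h, Ne.symm h]

lemma pvF_replicate (v : String) : ∀ (dgrn : List String) (k : Nat),
    (((List.range' k dgrn.length).zip dgrn).filter (fun p => p.2 == v)).map Prod.fst
      = (pvF v dgrn (List.replicate dgrn.length "")).map (· + k) := by
  intro dgrn
  induction dgrn with
  | nil => intro k; simp [pvF]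
  | cons g gs ih =>
    intro k
    simp only [List.length_cons, List.range'_succ, List.replicate_succ, List.zip_cons_cons,
      List.filter_cons, pvF]
    by_cases h : g = v
    · simp only [h, beq_self_eq_true, if_true, List.map_cons, List.map_append,
        ih (k + 1)]
      simp
      intro a _
      omega
    · have hc2 : (g == v) = false := by simp [h]
      simp [hc2, ih (k + 1), List.map_map]
      intro a _
      omega

lemma pvInv_init (dgrn : List String) : pvInv dgrn (List.replicate dgrn.length "") (pvBuildSlots dgrn) := by
  intro v
  rw [pvBuildSlots, pvBuild_getD, PySem.Dict.getD_empty, List.nil_append,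
    List.filter_reverse, List.map_reverse, List.range_eq_range']
  rw [pvF_replicate v dgrn 0]
  simp

lemma pvS3_ne (x : String) (hx : x ≠ "") : pvS3 x ≠ "" := by
  intro h
  apply hx
  have h2 : (pvS3 x).toList = [] := by rw [h]; rfl
  rw [pvS3] at h2
  simp [pysem] at h2
  exact h2

-- phase-1 bisimulation: A's scan loop and B's dict loop produce the same ddat/doff
lemma pvPhase1 (dgrn : List String) : ∀ (dat ddat doff : List String) (slots : PySem.Dict String (List Nat)),
    pvInv dgrn ddat slots →
      (dat.foldl (pvStepA dgrn) (ddat, doff) = ((dat.foldl pvStepB (slots, ddat, doff)).2.1, (dat.foldl pvStepB (slots, ddat, doff)).2.2)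
       ∧ pvInv dgrn (dat.foldl pvStepB (slots, ddat, doff)).2.1 (dat.foldl pvStepB (slots, ddat, doff)).1) := by
  intro dat
  induction dat with
  | nil => intro ddat doff slots hInv; exact ⟨rfl, hInv⟩
  | cons x xs ih =>
    intro ddat doff slots hInv
    by_cases hx : (x == "") = true
    · simp only [List.foldl_cons, pvStepA, pvStepB, hx, if_true]
      exact ih ddat doff slots hInv
    · have hx' : x ≠ "" := by simpa using hx
      have hx3 : pvS3 x ≠ "" := pvS3_ne x hx'
      have hB : (slots.getD (pvS3 x) []).getLast? = (pvF (pvS3 x) dgrn ddat).head? := by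
        rw [hInv (pvS3 x), List.getLast?_reverse]
      simp only [List.foldl_cons, pvStepA, pvStepB, hx, if_false, Bool.false_eq_true,
        pvFindSlot_eq_head, hB]
      cases hh : (pvF (pvS3 x) dgrn ddat).head? with
      | none => exact ih ddat (doff ++ [pvS3 x]) slots hInv
      | some i =>
        obtain ⟨hSelf, hOther⟩ := pvF_head_spec (pvS3 x) hx3 dgrn ddat i hh
        refine ih (ddat.set i (pvS3 x)) doff _ ?_
        intro v
        rw [PySem.Dict.getD_insert]
        by_cases hv : v = pvS3 x
        · rw [if_pos hv, hInv (pvS3 x), List.dropLast_reverse, hv, hSelf]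
        · rw [if_neg hv, hInv v, hOther v hv]

-- abstract result of the fill pass
def pvZipFill (exc : String) : List String → List String → List String
  | [], _ => []
  | d :: ds, doff =>
    if d = "" then
      match doff with
      | y :: r => pvCat exc y :: pvZipFill exc ds r
      | [] => exc :: pvZipFill exc ds []
    else d :: pvZipFill exc ds doff

def pvE : List String → List Nat
  | [] => []
  | d :: ds => (if d = "" then [0] else []) ++ (pvE ds).map (· + 1)

lemma pvE_range (ddat : List String) : ∀ (k : Nat),
    ((List.range' k ddat.length).zip ddat).filterMap (fun p => if p.2 == "" then some p.1 else none)
      = (pvE ddat).map (· + k) := by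
  induction ddat with
  | nil => intro k; simp [pvE]
  | cons d ds ih =>
    intro k
    simp only [List.length_cons, List.range'_succ, List.zip_cons_cons, List.filterMap_cons, pvE]
    rw [ih (k + 1)]
    by_cases h : d = ""
    · simp [h, List.map_map]
      intro a _
      omega
    · simp [h, List.map_map]
      intro a _
      omega

lemma pvE_length (ddat : List String) : (pvE ddat).length = ddat.countP (· == "") := by
  induction ddat with
  | nil => rfl
  | cons d ds ih =>
    by_cases h : d = ""
    · simp [pvE, h, ih]
    · simp [pvE, h, ih]

lemma pvFoldSetShift (d : String) (ps : List (Nat × String)) : ∀ (ds : List String),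
    ((ps.map (Prod.map (· + 1) (id : String → String))).foldl (fun l p => l.set p.1 p.2) (d :: ds))
      = d :: ps.foldl (fun l p => l.set p.1 p.2) ds := by
  induction ps with
  | nil => intro ds; rfl
  | cons p ps ih =>
    intro ds
    cases p with
    | mk i y => simp only [List.map_cons, List.foldl_cons, Prod.map, id, List.set_cons_succ, ih]

-- B's fill pass equals pvZipFill
lemma pvFillB (exc : String) : ∀ (ddat doff : List String),
    (((pvE ddat).zip ((doff.take (pvE ddat).length).map (pvCat exc) ++ List.replicate ((pvE ddat).length - doff.length) exc)).foldl
        (fun l p => l.set p.1 p.2) ddat)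
      = pvZipFill exc ddat doff := by
  intro ddat
  induction ddat with
  | nil => intro doff; simp [pvE, pvZipFill]
  | cons d ds ih =>
    intro doff
    by_cases h : d = ""
    · subst h
      cases doff with
      | nil =>
        simpa [pvE, pvZipFill, List.replicate_succ, List.zip_map_left, pvFoldSetShift]
          using ih []
      | cons y r =>
        simpa [pvE, pvZipFill, Nat.succ_sub_succ, List.zip_map_left, pvFoldSetShift]
          using ih r
    · simpa [pvE, pvZipFill, h, List.zip_map_left, pvFoldSetShift] using ih doff

-- A's second loop in closed form
lemma pvPhase2A (exc : String) : ∀ (ddat doff acc : List String) (tp fp fn : Int),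
    ddat.foldl (pvStep2A exc) (acc, doff, tp, fp, fn)
      = (acc ++ pvZipFill exc ddat doff,
         doff.drop (ddat.countP (· == "")),
         tp + ((ddat.length - ddat.countP (· == "") : Nat) : Int),
         fp + ((min (ddat.countP (· == "")) doff.length : Nat) : Int),
         fn + ((ddat.countP (· == "") - min (ddat.countP (· == "")) doff.length : Nat) : Int)) := by
  intro ddat
  induction ddat with
  | nil => intro doff acc tp fp fn; simp [pvZipFill]
  | cons d ds ih =>
    intro doff acc tp fp fn
    have hcle := List.countP_le_length (p := fun x => x == "") (l := ds)
    by_cases h : d = ""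
    · subst h
      cases doff with
      | nil =>
        rw [List.foldl_cons]
        show ds.foldl (pvStep2A exc) (acc ++ [exc], [], tp, fp, fn + 1) = _
        rw [ih]
        simp only [Prod.mk.injEq]
        refine ⟨?_, ?_, ?_, ?_, ?_⟩
        · simp [pvZipFill, List.append_assoc]
        · simp
        · simp only [List.countP_cons, List.length_cons]; simp
        · simp only [List.countP_cons, List.length_nil]; simp
        · simp only [List.countP_cons, List.length_nil]; simp; omega
      | cons y r =>
        rw [List.foldl_cons]
        show ds.foldl (pvStep2A exc) (acc ++ [pvCat exc y], r, tp, fp + 1, fn) = _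
        rw [ih]
        simp only [Prod.mk.injEq, List.countP_cons, List.length_cons]
        refine ⟨?_, ?_, ?_, ?_, ?_⟩
        · simp [pvZipFill, List.append_assoc]
        · simp [List.drop_succ_cons]
        · simp
        · simp; omega
        · simp
    · rw [List.foldl_cons]
      have hb : (d == "") = false := by simp [h]
      have hstep : pvStep2A exc (acc, doff, tp, fp, fn) d = (acc ++ [d], doff, tp + 1, fp, fn) := by
        simp [pvStep2A, hb]
      rw [hstep, ih]
      simp only [Prod.mk.injEq, List.countP_cons, List.length_cons, hb]
      refine ⟨?_, ?_, ?_, ?_, ?_⟩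
      · simp [pvZipFill, h, List.append_assoc]
      · simp
      · simp; omega
      · simp
      · simp

-- ===== VERDICT (by name: the statement is the Claim_ definition above) =====
theorem get_correct_spec : Claim_equal_get_correct := by
  unfold Claim_equal_get_correct
  intro ref dat exc _
  unfold Spec_get_correct get_correct get_correct_alt
  obtain ⟨h1, -⟩ := pvPhase1 ((PySem.List.sorted ref id).map pvS3) dat
    (List.replicate ((PySem.List.sorted ref id).map pvS3).length "") []
    (pvBuildSlots ((PySem.List.sorted ref id).map pvS3))
    (pvInv_init ((PySem.List.sorted ref id).map pvS3))
  simp only []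
  rw [h1]
  set ddat := (dat.foldl pvStepB (pvBuildSlots ((PySem.List.sorted ref id).map pvS3),
    List.replicate ((PySem.List.sorted ref id).map pvS3).length "", [])).2.1 with hdd
  set doff := (dat.foldl pvStepB (pvBuildSlots ((PySem.List.sorted ref id).map pvS3),
    List.replicate ((PySem.List.sorted ref id).map pvS3).length "", [])).2.2 with hdo
  have hE : ((List.range ddat.length).zip ddat).filterMap
      (fun p => if p.2 == "" then some p.1 else none) = pvE ddat := by
    rw [List.range_eq_range']
    simpa using pvE_range ddat 0
  rw [pvPhase2A, hE, pvE_length, ← pvE_length, pvFillB exc ddat doff, pvE_length]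
  have hcle := List.countP_le_length (p := fun x => x == "") (l := ddat)
  by_cases hr : List.drop (List.countP (fun x => x == "") ddat) doff = []
  · have hdl := List.drop_eq_nil_iff.mp hr
    simp [hr]
    refine ⟨?_, ?_, ?_⟩ <;> omega
  · have hdl : List.countP (fun x => x == "") ddat < doff.length := by
      by_contra hc
      exact hr (List.drop_eq_nil_iff.mpr (by omega))
    simp [hr, List.length_drop]
    refine ⟨?_, ?_, ?_⟩ <;> omega
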